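-- pv_equiv track=rewrite | github.com/uos3/ground-sig-pro | turbo/turbo.py | subblock_interleave
-- ===== SOURCE A (Python) =====
-- import math
--
-- def subblock_interleave(d, d_select):
--     D = len(d)
--     C = 32
--     R = math.ceil(D/C)
--     N_D = R*C-D  # number of prepended nulls
--     y = [-1]*N_D +  d
--     P =  [0, 16, 8, 24, 4, 20, 12, 28, 2, 18, 10, 26, 6, 22, 14, 30, 1, 17, 9, 25, 5, 21, 13, 29, 3, 19, 11, 27, 7, 23, 15, 31]
--
--     v = [0]*(R*C)
--
--     if not d_select == 2:
--         # Perform interleaving for d_0, d_1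
--         # Read out column wise, jumping between columns based on the pattern P
--         k = 0
--         for c in range(0, C):
--             col = P[c]
--             for r in range(0, R):
--                 v[k] = y[ r*C + col ]
--                 k += 1
--     else:
--         # For d_2, just the equation
--         K = R*C
--         for k in range(0, R*C):
--             pi_k = ( P[math.floor(k/R)] + C*(k%R) + 1 )%K
--             v[k] = y[pi_k]
--     return v
-- ===== SOURCE B (Python) =====
-- # Inverse-permutation scatter: instead of gathering v[k] = y[pi(k)] in output
-- # order, walk the padded source once and WRITE each element to its destination
-- # v[pi_inv(j)] = y[j].  P is a 5-bit bit-reversal, hence its own inverse.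
-- P = [0, 16, 8, 24, 4, 20, 12, 28, 2, 18, 10, 26, 6, 22, 14, 30,
--      1, 17, 9, 25, 5, 21, 13, 29, 3, 19, 11, 27, 7, 23, 15, 31]
--
-- def subblock_interleave(d, d_select):
--     C = 32
--     R = (len(d) + C - 1) // C
--     K = R * C
--     y = [-1] * (K - len(d)) + d
--     v = [0] * K
--     if d_select != 2:
--         for j, x in enumerate(y):
--             r, col = divmod(j, C)
--             v[P[col] * R + r] = x
--     else:
--         for j, x in enumerate(y):
--             t = (j - 1) % K
--             v[P[t % C] * R + t // C] = x
--     return v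
-- ===== Notes on version B (the rewrite author's own statement) =====
-- stated objective: alternative
-- what changed: B inverts the permutation: instead of gathering v[k]=y[pi(k)] in output order (A's nested column loops / closed-form index read), B walks the padded source once and scatters each element to its destination v[pi_inv(j)]=y[j], exploiting that the table P (a 5-bit bit-reversal) is its own inverse.
import Mathlib
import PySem

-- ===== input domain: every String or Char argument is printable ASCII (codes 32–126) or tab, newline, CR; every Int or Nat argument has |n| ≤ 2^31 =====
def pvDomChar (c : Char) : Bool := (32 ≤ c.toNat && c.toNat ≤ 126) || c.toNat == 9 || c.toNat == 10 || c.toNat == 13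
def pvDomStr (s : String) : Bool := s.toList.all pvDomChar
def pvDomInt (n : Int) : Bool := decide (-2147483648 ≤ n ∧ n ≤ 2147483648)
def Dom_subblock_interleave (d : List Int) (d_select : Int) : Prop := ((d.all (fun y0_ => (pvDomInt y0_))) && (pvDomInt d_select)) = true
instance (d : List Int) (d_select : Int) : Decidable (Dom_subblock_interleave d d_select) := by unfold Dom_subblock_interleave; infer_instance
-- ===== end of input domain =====

-- B replaces A's output-order gather (v[k] = y[pi(k)]) by a single scatter pass over the
-- padded source (v[pi_inv(j)] = y[j]), using that the table P is its own inverse (alternative; same cost).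


-- ===== PORT A =====
-- the constant permutation table P (shared verbatim by both programs)
def pvP : List Nat := [0, 16, 8, 24, 4, 20, 12, 28, 2, 18, 10, 26, 6, 22, 14, 30,
                       1, 17, 9, 25, 5, 21, 13, 29, 3, 19, 11, 27, 7, 23, 15, 31]

-- Literal port of A.  math.ceil(D/C) on a list length is exactly (D+C-1)/C in Nat.
-- y[...] / P[...] indexing is ported as getD; the indices are always in range
-- (a consequence of the arithmetic, used in the proofs below), so this is exact:
-- the Python never raises.
def subblock_interleave (d : List Int) (d_select : Int) : List Int :=
  let D := d.length
  let C := 32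
  let R := (D + C - 1) / C
  let N_D := R * C - D
  let y := List.replicate N_D (-1) ++ d
  let v := List.replicate (R * C) (0 : Int)
  if ¬ (d_select = 2) then
    ((List.range C).foldl (fun (vk : List Int × Nat) c =>
        let col := pvP.getD c 0
        (List.range R).foldl (fun vk r => (vk.1.set vk.2 (y.getD (r * C + col) 0), vk.2 + 1)) vk)
      (v, 0)).1
  else
    let K := R * C
    (List.range K).foldl (fun v k =>
      v.set k (y.getD ((pvP.getD (k / R) 0 + C * (k % R) + 1) % K) 0)) v

-- ===== PORT B =====
-- Literal port of B (Source B): ONE pass over enumerate(y) that scatters each source element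
-- to its destination index; enumerate/divmod//% are ported with PySem.  The destination
-- indices are non-negative ints always in range (proved below), so v[dest] = x is List.set
-- and .toNat on the (provably non-negative) quotients/remainders is exact.
def subblock_interleave_alt (d : List Int) (d_select : Int) : List Int :=
  let C := 32
  let R := (d.length + C - 1) / C
  let K := R * C
  let y := List.replicate (K - d.length) (-1 : Int) ++ d
  let v := List.replicate K (0 : Int)
  if d_select ≠ 2 then
    (PySem.List.enumerate y).foldl (fun v jx =>
      let r := PySem.Int.floordiv jx.1 32
      let col := PySem.Int.mod jx.1 32
      v.set (pvP.getD col.toNat 0 * R + r.toNat) jx.2) v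
  else
    (PySem.List.enumerate y).foldl (fun v jx =>
      let t := PySem.Int.mod (jx.1 - 1) (K : Int)
      v.set (pvP.getD (PySem.Int.mod t 32).toNat 0 * R + (PySem.Int.floordiv t 32).toNat) jx.2) v

-- ===== PRECONDITION & SPEC =====
def Spec_subblock_interleave (d : List Int) (d_select : Int) (out : List Int) : Prop := out = subblock_interleave_alt d d_select
instance (d : List Int) (d_select : Int) (out : List Int) : Decidable (Spec_subblock_interleave d d_select out) := by unfold Spec_subblock_interleave; infer_instance

-- ===== CLAIM =====
def Claim_equal_subblock_interleave : Prop := ∀ (d : List Int) (d_select : Int), Dom_subblock_interleave d d_select → Spec_subblock_interleave d d_select (subblock_interleave d d_select)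

-- ===== LEMMAS AND PROOFS =====

/-- Sequential writes through a pair state (list, cursor): one inner loop of A. -/
lemma foldl_set_seq (g : Nat → Int) :
    ∀ (n : Nat) (v : List Int) (k0 : Nat), k0 + n ≤ v.length →
      (List.range n).foldl (fun vk r => (vk.1.set vk.2 (g r), vk.2 + 1)) (v, k0)
        = (v.take k0 ++ (List.range n).map g ++ v.drop (k0 + n), k0 + n) := by
  intro n
  induction n with
  | zero => intro v k0 h; simp
  | succ n ih =>
    intro v k0 h
    rw [List.range_succ, List.foldl_append, ih v k0 (by omega)]
    simp only [List.foldl_cons, List.foldl_nil, List.map_append, List.map_cons, List.map_nil,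
      Prod.mk.injEq]
    have htk : (v.take k0).length = k0 := by simp; omega
    have hmp : ((List.range n).map g).length = n := by simp
    have hlt : k0 + n < v.length := by omega
    refine ⟨?_, by omega⟩
    rw [List.append_assoc, List.set_append_right _ _ (by rw [htk]; omega),
      List.set_append_right _ _ (by rw [hmp, htk]; omega)]
    rw [List.drop_eq_getElem_cons hlt]
    have h0 : k0 + n - (v.take k0).length - ((List.range n).map g).length = 0 := by
      rw [htk, hmp]; omega
    rw [h0, List.set_cons_zero]
    simp [List.append_assoc]
    omega

/-- The whole nested loop of A's first branch equals a flatMap of column read-outs. -/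
lemma foldl_set_nested (g : Nat → Nat → Int) (n : Nat) :
    ∀ (m : Nat) (v : List Int) (k0 : Nat), k0 + m * n ≤ v.length →
      (List.range m).foldl (fun vk c =>
          (List.range n).foldl (fun vk r => (vk.1.set vk.2 (g c r), vk.2 + 1)) vk) (v, k0)
        = (v.take k0 ++ (List.range m).flatMap (fun c => (List.range n).map (g c))
            ++ v.drop (k0 + m * n), k0 + m * n) := by
  intro m
  induction m with
  | zero => intro v k0 h; simp
  | succ m ih =>
    intro v k0 h
    have hstep : m * n ≤ (m + 1) * n := Nat.mul_le_mul_right n (by omega)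
    have hmn : k0 + m * n ≤ v.length := by omega
    rw [List.range_succ, List.foldl_append, ih v k0 hmn]
    simp only [List.foldl_cons, List.foldl_nil]
    set F := (List.range m).flatMap (fun c => (List.range n).map (g c)) with hF
    have hFlen : F.length = m * n := by
      simp [hF, Nat.mul_comm]
    have htk : (v.take k0).length = k0 := by simp; omega
    have hA1 : (v.take k0 ++ F).length = k0 + m * n := by simp [hFlen, htk]
    have hwlen : (v.take k0 ++ F ++ v.drop (k0 + m * n)).length = v.length := by
      simp [hFlen, htk]; omega
    have hlen' : k0 + m * n + n ≤ v.length := by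
      have : (m + 1) * n = m * n + n := by ring
      omega
    rw [foldl_set_seq (g m) n _ (k0 + m * n) (by rw [hwlen]; exact hlen')]
    have htake : (v.take k0 ++ F ++ v.drop (k0 + m * n)).take (k0 + m * n)
        = v.take k0 ++ F := List.take_left' hA1
    have hdrop : (v.take k0 ++ F ++ v.drop (k0 + m * n)).drop (k0 + m * n + n)
        = v.drop (k0 + (m + 1) * n) := by
      rw [← List.drop_drop, List.drop_left' hA1, List.drop_drop]
      congr 1
      ring
    have hflat : (List.range m ++ [m]).flatMap (fun c => (List.range n).map (g c))
        = F ++ (List.range n).map (g m) := by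
      rw [List.flatMap_append]
      simp [hF]
    rw [htake, hdrop, hflat]
    refine Prod.ext ?_ ?_
    · simp [List.append_assoc]
    · simp only []
      show k0 + m * n + n = k0 + (m + 1) * n
      ring

/-- A's second branch: sequential set across the whole list is just a map. -/
lemma foldl_set_map (g : Nat → Int) :
    ∀ (n : Nat) (v : List Int), n ≤ v.length →
      (List.range n).foldl (fun v k => v.set k (g k)) v
        = (List.range n).map g ++ v.drop n := by
  intro n
  induction n with
  | zero => intro v h; simp
  | succ n ih =>
    intro v h
    rw [List.range_succ, List.foldl_append, ih v (by omega)]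
    simp only [List.foldl_cons, List.foldl_nil, List.map_append, List.map_cons, List.map_nil]
    have hmp : ((List.range n).map g).length = n := by simp
    have hlt : n < v.length := by omega
    rw [List.set_append_right _ _ (by omega : ((List.range n).map g).length ≤ n),
      List.drop_eq_getElem_cons hlt]
    have h0 : n - ((List.range n).map g).length = 0 := by simp
    rw [h0, List.set_cons_zero]
    simp [List.append_assoc]

/-- Every entry of the permutation table (and the getD default) is < 32. -/
lemma pvP_getD_lt (c : Nat) : pvP.getD c 0 < 32 := by
  rw [List.getD_eq_getElem?_getD]
  cases hx : pvP[c]? with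
  | none => simp
  | some a =>
    have ha : a ∈ pvP := List.mem_of_getElem? hx
    have hall : pvP.all (fun x => decide (x < 32)) = true := by decide
    have := List.all_eq_true.mp hall a ha
    simpa using this

/-- P is an involution (5-bit bit reversal): P[P[a]] = a for a < 32. -/
lemma pvP_invol : ∀ a, a < 32 → pvP.getD (pvP.getD a 0) 0 = a := by decide

/-- Division with remainder decomposition: (a*R + b) / R = a and (a*R + b) % R = b when b < R. -/
lemma div_mod_decomp (a b R : Nat) (hb : b < R) :
    (a * R + b) / R = a ∧ (a * R + b) % R = b := by
  have hR : 0 < R := by omega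
  constructor
  · rw [Nat.mul_comm a R, Nat.mul_add_div hR, Nat.div_eq_of_lt hb]
    omega
  · rw [Nat.mul_comm a R, Nat.mul_add_mod, Nat.mod_eq_of_lt hb]

/-- Flattening a rectangle of maps into one map over the flat index. -/
lemma flatMap_range_map (g : Nat → Nat → Int) (n : Nat) :
    ∀ (m : Nat), (List.range m).flatMap (fun c => (List.range n).map (g c))
      = (List.range (m * n)).map (fun k => g (k / n) (k % n)) := by
  intro m
  induction m with
  | zero => simp
  | succ m ih =>
    rw [List.range_succ, List.flatMap_append, ih]
    have : (m + 1) * n = m * n + n := by ring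
    rw [this, List.range_add, List.map_append, List.map_map]
    congr 1
    simp only [List.flatMap_cons, List.flatMap_nil, List.append_nil]
    refine List.map_congr_left ?_
    intro r hr
    rw [List.mem_range] at hr
    have hd := div_mod_decomp m r n hr
    simp [Function.comp, hd.1, hd.2]

/-- A fold of writes never changes the length. -/
lemma length_foldl_set (f : Nat → Nat) (g : Nat → Int) :
    ∀ (l : List Nat) (v0 : List Int),
      (l.foldl (fun v j => v.set (f j) (g j)) v0).length = v0.length := by
  intro l
  induction l with
  | nil => intro v0; rfl
  | cons x l ih => intro v0; simp [ih]

/-- The scatter fold read back at k: the unique writer j0 with f j0 = k determines the value. -/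
lemma getElem?_foldl_set (f : Nat → Nat) (g : Nat → Int) :
    ∀ (n : Nat) (v0 : List Int) (k j0 : Nat), j0 < n → f j0 = k →
      (∀ j, j < n → f j = k → j = j0) → k < v0.length →
      ((List.range n).foldl (fun v j => v.set (f j) (g j)) v0)[k]? = some (g j0) := by
  intro n
  induction n with
  | zero => intro v0 k j0 h; omega
  | succ n ih =>
    intro v0 k j0 hj0 hf huniq hk
    rw [List.range_succ, List.foldl_append]
    simp only [List.foldl_cons, List.foldl_nil]
    by_cases hjn : j0 = n
    · subst hjn
      have hlen : ((List.range j0).foldl (fun v j => v.set (f j) (g j)) v0).length = v0.length :=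
        length_foldl_set f g _ _
      rw [← hf, List.getElem?_set_self (by rw [hlen, hf]; exact hk)]
    · have hfn : f n ≠ k := fun h => hjn ((huniq n (by omega) h).symm)
      rw [List.getElem?_set_ne hfn]
      exact ih v0 k j0 (by omega) hf (fun j hj => huniq j (by omega)) hk

/-- Scatter along a permutation equals the gather map along its inverse. -/
lemma scatter_eq_map (f σ : Nat → Nat) (g : Nat → Int) (n : Nat)
    (hfσ : ∀ k, k < n → σ k < n ∧ f (σ k) = k)
    (hσf : ∀ j, j < n → σ (f j) = j) :
    (List.range n).foldl (fun v j => v.set (f j) (g j)) (List.replicate n (0 : Int))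
      = (List.range n).map (fun k => g (σ k)) := by
  apply List.ext_getElem?
  intro k
  by_cases hk : k < n
  · rw [getElem?_foldl_set f g n _ k (σ k) (hfσ k hk).1 (hfσ k hk).2
      (fun j hj hfj => by rw [← hσf j hj, hfj]) (by simp [hk])]
    rw [List.getElem?_map, List.getElem?_range hk]
    rfl
  · have h1 : ((List.range n).foldl (fun v j => v.set (f j) (g j))
        (List.replicate n (0 : Int))).length = n := by
      rw [length_foldl_set]; simp
    rw [List.getElem?_eq_none (by rw [h1]; omega), List.getElem?_eq_none (by simp; omega)]

/-- B's enumerate-driven scatter is a range-driven scatter over Nat indices. -/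
lemma enum_foldl_set (y : List Int) (F : Int → Nat) (f : Nat → Nat)
    (hF : ∀ j : Nat, j < y.length → F (j : Int) = f j) (v0 : List Int) :
    (PySem.List.enumerate y).foldl (fun v jx => v.set (F jx.1) jx.2) v0
      = (List.range y.length).foldl (fun v j => v.set (f j) (y.getD j 0)) v0 := by
  rw [PySem.List.enumerate_eq_map_pyRange y 0, List.foldl_map]
  rw [show PySem.List.len y = ((y.length : Nat) : Int) from PySem.List.len_eq y]
  rw [PySem.List.pyRange_zero_natCast, List.foldl_map]
  refine PySem.List.foldl_congr_mem _ _ _ _ ?_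
  intro acc x hx
  rw [List.mem_range] at hx
  simp only [PySem.List.pyGetD_natCast, hF x hx]

/-- Branch 1 scatter inverse: the destination map applied to the gather index gives k back. -/
lemma branch1_fs (R k : Nat) (hk : k < R * 32) :
    (k % R) * 32 + pvP.getD (k / R) 0 < R * 32 ∧
    pvP.getD (((k % R) * 32 + pvP.getD (k / R) 0) % 32) 0 * R
      + ((k % R) * 32 + pvP.getD (k / R) 0) / 32 = k := by
  have hR : 0 < R := by omega
  have hp := pvP_getD_lt (k / R)
  have hmod : k % R < R := Nat.mod_lt _ hR
  refine ⟨by omega, ?_⟩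
  have hd := div_mod_decomp (k % R) (pvP.getD (k / R) 0) 32 hp
  rw [hd.1, hd.2, pvP_invol (k / R) ((Nat.div_lt_iff_lt_mul hR).mpr (by omega))]
  rw [Nat.mul_comm]
  exact Nat.div_add_mod k R

/-- Branch 1 gather inverse: the gather map applied to the destination index gives j back. -/
lemma branch1_sf (R j : Nat) (hj : j < R * 32) :
    ((pvP.getD (j % 32) 0 * R + j / 32) % R) * 32
      + pvP.getD ((pvP.getD (j % 32) 0 * R + j / 32) / R) 0 = j := by
  have hb : j / 32 < R := by omega
  have hd := div_mod_decomp (pvP.getD (j % 32) 0) (j / 32) R hb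
  rw [hd.1, hd.2, pvP_invol (j % 32) (by omega)]
  omega

/-- Branch 2 scatter inverse. -/
lemma branch2_fs (R k : Nat) (hk : k < R * 32) :
    (pvP.getD (k / R) 0 + 32 * (k % R) + 1) % (R * 32) < R * 32 ∧
    pvP.getD (((pvP.getD (k / R) 0 + 32 * (k % R) + 1) % (R * 32) + R * 32 - 1) % (R * 32) % 32) 0 * R
      + ((pvP.getD (k / R) 0 + 32 * (k % R) + 1) % (R * 32) + R * 32 - 1) % (R * 32) / 32 = k := by
  have hR : 0 < R := by omega
  have hp := pvP_getD_lt (k / R)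
  have hmod : k % R < R := Nat.mod_lt _ hR
  set p := pvP.getD (k / R) 0 with hpdef
  have hm : p + 32 * (k % R) < R * 32 := by omega
  refine ⟨Nat.mod_lt _ (by omega), ?_⟩
  have ht : ((p + 32 * (k % R) + 1) % (R * 32) + R * 32 - 1) % (R * 32) = p + 32 * (k % R) := by
    by_cases hedge : p + 32 * (k % R) + 1 = R * 32
    · rw [hedge, Nat.mod_self]
      have : 0 + R * 32 - 1 = p + 32 * (k % R) := by omega
      rw [this, Nat.mod_eq_of_lt hm]
    · rw [Nat.mod_eq_of_lt (by omega : p + 32 * (k % R) + 1 < R * 32)]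
      have : p + 32 * (k % R) + 1 + R * 32 - 1 = p + 32 * (k % R) + R * 32 := by omega
      rw [this, Nat.add_mod_right, Nat.mod_eq_of_lt hm]
  rw [ht]
  have hcomm : p + 32 * (k % R) = (k % R) * 32 + p := by ring
  rw [hcomm]
  have hd := div_mod_decomp (k % R) p 32 hp
  rw [hd.1, hd.2, hpdef, pvP_invol (k / R) ((Nat.div_lt_iff_lt_mul hR).mpr (by omega))]
  rw [Nat.mul_comm]
  exact Nat.div_add_mod k R

/-- Branch 2 gather inverse. -/
lemma branch2_sf (R j : Nat) (hj : j < R * 32) :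
    (pvP.getD ((pvP.getD ((j + R * 32 - 1) % (R * 32) % 32) 0 * R
        + (j + R * 32 - 1) % (R * 32) / 32) / R) 0
      + 32 * ((pvP.getD ((j + R * 32 - 1) % (R * 32) % 32) 0 * R
        + (j + R * 32 - 1) % (R * 32) / 32) % R) + 1) % (R * 32) = j := by
  have hR : 0 < R := by omega
  set t := (j + R * 32 - 1) % (R * 32) with htdef
  have htlt : t < R * 32 := Nat.mod_lt _ (by omega)
  have hb : t / 32 < R := by omega
  have hd := div_mod_decomp (pvP.getD (t % 32) 0) (t / 32) R hb
  rw [hd.1, hd.2, pvP_invol (t % 32) (by omega)]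
  have hstep : t % 32 + 32 * (t / 32) + 1 = t + 1 := by omega
  rw [hstep]
  by_cases hj0 : j = 0
  · have : t = R * 32 - 1 := by
      rw [htdef, hj0]
      have h0 : 0 + R * 32 - 1 = R * 32 - 1 := by omega
      rw [h0, Nat.mod_eq_of_lt (by omega)]
    rw [this]
    have : R * 32 - 1 + 1 = R * 32 := by omega
    rw [this, Nat.mod_self, hj0]
  · have : t = j - 1 := by
      rw [htdef]
      have : j + R * 32 - 1 = (j - 1) + R * 32 := by omega
      rw [this, Nat.add_mod_right, Nat.mod_eq_of_lt (by omega)]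
    rw [this]
    have : j - 1 + 1 = j := by omega
    rw [this, Nat.mod_eq_of_lt hj]

-- ===== VERDICT =====
theorem subblock_interleave_spec : Claim_equal_subblock_interleave := by
  unfold Claim_equal_subblock_interleave Spec_subblock_interleave
  intro d d_select _
  unfold subblock_interleave subblock_interleave_alt
  simp only []
  set R := (d.length + 32 - 1) / 32 with hR
  have hRD : d.length <= R * 32 := by omega
  set y := List.replicate (R * 32 - d.length) (-1 : Int) ++ d with hy
  have hylen : y.length = R * 32 := by simp [hy]; omega
  by_cases hs : d_select = 2
  · -- second branches of both programs
    simp only [hs, not_true_eq_false, if_false, ne_eq]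
    rw [foldl_set_map (fun k => y.getD ((pvP.getD (k / R) 0 + 32 * (k % R) + 1) % (R * 32)) 0)
      (R * 32) (List.replicate (R * 32) 0) (by simp)]
    rw [List.drop_of_length_le (by simp), List.append_nil]
    rw [enum_foldl_set y
      (fun i => pvP.getD (PySem.Int.mod (PySem.Int.mod (i - 1) ((R * 32 : Nat) : Int)) 32).toNat 0 * R
        + (PySem.Int.floordiv (PySem.Int.mod (i - 1) ((R * 32 : Nat) : Int)) 32).toNat)
      (fun j => pvP.getD ((j + R * 32 - 1) % (R * 32) % 32) 0 * R
        + (j + R * 32 - 1) % (R * 32) / 32)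
      (by
        intro j hj
        rw [hylen] at hj
        simp only []
        have hm : PySem.Int.mod ((j : Int) - 1) ((R * 32 : Nat) : Int)
            = (((j + R * 32 - 1) % (R * 32) : Nat) : Int) := by
          rw [PySem.Int.mod_eq_emod_of_pos (by exact_mod_cast (by omega : 0 < R * 32))]
          have e1 : (j : Int) - 1 = ((j + R * 32 - 1 : Nat) : Int) - ((R * 32 : Nat) : Int) := by
            push_cast; omega
          rw [e1, Int.sub_emod_right]
          push_cast
          rfl
        rw [hm, PySem.Int.mod_eq_emod_of_pos (by norm_num),
          PySem.Int.floordiv_eq_ediv_of_pos (by norm_num)]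
        have h1 : ((((j + R * 32 - 1) % (R * 32) : Nat) : Int) % 32).toNat
            = (j + R * 32 - 1) % (R * 32) % 32 := by omega
        have h2 : ((((j + R * 32 - 1) % (R * 32) : Nat) : Int) / 32).toNat
            = (j + R * 32 - 1) % (R * 32) / 32 := by omega
        rw [h1, h2])
      (List.replicate (R * 32) 0)]
    rw [hylen]
    rw [scatter_eq_map _
      (fun k => (pvP.getD (k / R) 0 + 32 * (k % R) + 1) % (R * 32)) _ (R * 32)
      (fun k hk => branch2_fs R k hk) (fun j hj => branch2_sf R j hj)]
  · -- first branches of both programs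
    rw [if_pos (by exact hs : ¬ d_select = 2), if_pos (by exact hs : d_select ≠ 2)]
    rw [foldl_set_nested (fun c r => y.getD (r * 32 + pvP.getD c 0) 0) R 32
      (List.replicate (R * 32) 0) 0 (by simp [Nat.mul_comm])]
    simp only [List.take_zero, Nat.zero_add, List.nil_append]
    rw [List.drop_of_length_le (by simp [Nat.mul_comm]), List.append_nil]
    rw [flatMap_range_map (fun c r => y.getD (r * 32 + pvP.getD c 0) 0) R 32]
    rw [enum_foldl_set y
      (fun i => pvP.getD (PySem.Int.mod i 32).toNat 0 * R + (PySem.Int.floordiv i 32).toNat)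
      (fun j => pvP.getD (j % 32) 0 * R + j / 32)
      (by
        intro j hj
        simp only []
        rw [PySem.Int.mod_eq_emod_of_pos (by norm_num),
          PySem.Int.floordiv_eq_ediv_of_pos (by norm_num)]
        have h1 : ((j : Int) % 32).toNat = j % 32 := by omega
        have h2 : ((j : Int) / 32).toNat = j / 32 := by omega
        rw [h1, h2])
      (List.replicate (R * 32) 0)]
    rw [hylen]
    rw [scatter_eq_map _ (fun k => (k % R) * 32 + pvP.getD (k / R) 0) _ (R * 32)
      (fun k hk => branch1_fs R k hk) (fun j hj => branch1_sf R j hj)]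
    rw [Nat.mul_comm 32 R]
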